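-- pv_equiv track=rewrite | github.com/gabrielaoljacic/network-log-analyzer | src/analyzer.py | _assess_security_risk
-- ===== SOURCE A (Python) =====
-- from typing import List, Dict, Any, Optional
--
-- def _assess_security_risk(category: str, entities: Dict[str, Any]) -> str:
--     """Determine security risk level (low/medium/high/critical)"""
--     security_terms = [e[1] for e in entities.get('security_entities', [])]
--
--     if (category == 'security' or
--         'ATTACK' in security_terms or
--         'EXPLOIT' in security_terms):
--         return 'critical'
--     elif ('AUTH' in security_terms or
--           'MALICIOUS' in security_terms or
--           category in ['authentication', 'error']):
--         return 'high'
--     elif 'SUSPICIOUS' in security_terms: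
--         return 'medium'
--     return 'low'
-- ===== SOURCE B (Python) =====
-- def _assess_security_risk(category, entities):
--     """Determine security risk level (low/medium/high/critical)"""
--     labels = ['low', 'medium', 'high', 'critical']
--     cat_rank = {'security': 3, 'authentication': 2, 'error': 2}
--     term_rank = {'ATTACK': 3, 'EXPLOIT': 3, 'AUTH': 2, 'MALICIOUS': 2, 'SUSPICIOUS': 1}
--     rank = cat_rank.get(category, 0)
--     for e in entities.get('security_entities', []):
--         rank = max(rank, term_rank.get(e[1], 0))
--     return labels[rank]
-- ===== Notes on version B (the rewrite author's own statement) =====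
-- stated objective: simpler
-- what changed: Replaced the ordered if/elif cascade of membership tests with a score-and-take-maximum strategy: rank tables for category and security codes, one pass taking the max rank, then index into the label list.
import Mathlib
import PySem

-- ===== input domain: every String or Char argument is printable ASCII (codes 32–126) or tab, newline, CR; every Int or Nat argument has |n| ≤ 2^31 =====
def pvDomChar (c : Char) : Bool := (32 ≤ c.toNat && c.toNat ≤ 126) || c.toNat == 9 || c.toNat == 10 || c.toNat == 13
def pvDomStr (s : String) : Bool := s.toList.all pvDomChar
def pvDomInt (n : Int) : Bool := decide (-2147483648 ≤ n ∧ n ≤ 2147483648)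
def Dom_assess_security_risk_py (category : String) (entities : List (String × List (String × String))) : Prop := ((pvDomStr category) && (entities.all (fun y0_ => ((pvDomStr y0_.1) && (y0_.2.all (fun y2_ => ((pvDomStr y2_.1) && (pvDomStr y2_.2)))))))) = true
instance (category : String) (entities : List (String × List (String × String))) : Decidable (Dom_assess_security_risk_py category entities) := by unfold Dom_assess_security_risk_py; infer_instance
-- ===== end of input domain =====

-- B replaces A's ordered if/elif cascade by rank tables and a single max-fold (objective: simpler decomposition).


-- ===== PORT A =====
def assess_security_risk_py (category : String) (entities : List (String × List (String × String))) : String :=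
  let security_terms := ((PySem.Dict.mk entities).getD "security_entities" []).map (fun e => e.2)
  if category == "security" || security_terms.contains "ATTACK" || security_terms.contains "EXPLOIT" then
    "critical"
  else if security_terms.contains "AUTH" || security_terms.contains "MALICIOUS"
          || (["authentication", "error"] : List String).contains category then
    "high"
  else if security_terms.contains "SUSPICIOUS" then
    "medium"
  else
    "low"

-- ===== PORT B =====
def pvCatRank (c : String) : Nat :=
  (PySem.Dict.mk [("security", 3), ("authentication", 2), ("error", 2)]).getD c 0

def pvTermRank (t : String) : Nat :=
  (PySem.Dict.mk [("ATTACK", 3), ("EXPLOIT", 3), ("AUTH", 2), ("MALICIOUS", 2), ("SUSPICIOUS", 1)]).getD t 0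

def assess_security_risk_py_alt (category : String) (entities : List (String × List (String × String))) : String :=
  let labels : List String := ["low", "medium", "high", "critical"]
  let rank := ((PySem.Dict.mk entities).getD "security_entities" []).foldl
    (fun r e => max r (pvTermRank e.2)) (pvCatRank category)
  -- labels[rank]: rank ≤ 3 always, so the index is in range
  (PySem.List.pyGet? labels (rank : Int)).getD ""

-- ===== PRECONDITION & SPEC =====
def Spec_assess_security_risk_py (category : String) (entities : List (String × List (String × String))) (out : String) : Prop := out = assess_security_risk_py_alt category entities
instance (category : String) (entities : List (String × List (String × String))) (out : String) : Decidable (Spec_assess_security_risk_py category entities out) := by unfold Spec_assess_security_risk_py; infer_instance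

-- ===== CLAIM (what is proved, stated in full; the proofs are below) =====
def Claim_equal_assess_security_risk_py : Prop := ∀ (category : String) (entities : List (String × List (String × String))), Dom_assess_security_risk_py category entities → Spec_assess_security_risk_py category entities (assess_security_risk_py category entities)

-- ===== LEMMAS AND PROOFS =====

-- the rank A's cascade implicitly assigns to a list of security terms
def pvARank (ts : List String) : Nat :=
  if ts.contains "ATTACK" || ts.contains "EXPLOIT" then 3
  else if ts.contains "AUTH" || ts.contains "MALICIOUS" then 2
  else if ts.contains "SUSPICIOUS" then 1
  else 0

theorem pvARank_le (ts : List String) : pvARank ts ≤ 3 := by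
  unfold pvARank; split_ifs <;> omega

theorem pvTermRank_cons (t : String) (ts : List String) :
    pvARank (t :: ts) = max (pvTermRank t) (pvARank ts) := by
  by_cases h1 : "ATTACK" = t <;> by_cases h2 : "EXPLOIT" = t <;>
  by_cases h3 : "AUTH" = t <;> by_cases h4 : "MALICIOUS" = t <;>
  by_cases h5 : "SUSPICIOUS" = t <;>
  simp_all [pvARank, pvTermRank, PySem.Dict.getD, PySem.Dict.get?] <;>
  split_ifs <;> simp_all

theorem pvFold_eq (es : List (String × String)) (c0 : Nat) :
    es.foldl (fun r e => max r (pvTermRank e.2)) c0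
      = max c0 (pvARank (es.map (fun e => e.2))) := by
  induction es generalizing c0 with
  | nil => simp [pvARank]
  | cons e es ih =>
    simp only [List.foldl_cons, List.map_cons, ih, pvTermRank_cons]
    omega

theorem pvLabel_eq (c a : Nat) (hc : c ≤ 3) (ha : a ≤ 3) :
    (PySem.List.pyGet? ["low", "medium", "high", "critical"] ((max c a : Nat) : Int)).getD ""
      = if c = 3 ∨ a = 3 then "critical"
        else if c = 2 ∨ a = 2 then "high"
        else if c = 1 ∨ a = 1 then "medium"
        else "low" := by
  interval_cases c <;> interval_cases a <;> decide

theorem pvCore (category : String) (ts : List String) (k : Nat) (hk : k ≤ 3) (hk1 : k ≠ 1)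
    (hcat : pvCatRank category = k)
    (hsec : (category == "security") = decide (k = 3))
    (hae : ((["authentication", "error"] : List String).contains category) = decide (k = 2)) :
    (if category == "security" || ts.contains "ATTACK" || ts.contains "EXPLOIT" then "critical"
     else if ts.contains "AUTH" || ts.contains "MALICIOUS"
             || (["authentication", "error"] : List String).contains category then "high"
     else if ts.contains "SUSPICIOUS" then "medium"
     else "low")
    = (PySem.List.pyGet? ["low", "medium", "high", "critical"]
        ((max (pvCatRank category) (pvARank ts) : Nat) : Int)).getD "" := by
  rw [hcat, pvLabel_eq k (pvARank ts) hk (pvARank_le ts)]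
  unfold pvARank
  simp only [hsec, hae]
  split_ifs <;> simp_all

theorem assess_security_risk_py_spec : Claim_equal_assess_security_risk_py := by
  intro category entities _
  unfold Spec_assess_security_risk_py assess_security_risk_py assess_security_risk_py_alt
  simp only [pvFold_eq]
  by_cases hc1 : category = "security"
  · subst hc1; exact pvCore _ _ 3 (by omega) (by omega) (by decide) (by decide) (by decide)
  · by_cases hc2 : category = "authentication"
    · subst hc2; exact pvCore _ _ 2 (by omega) (by omega) (by decide) (by decide) (by decide)
    · by_cases hc3 : category = "error"
      · subst hc3; exact pvCore _ _ 2 (by omega) (by omega) (by decide) (by decide) (by decide)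
      · have hc1' : ("security" = category) = False := by simp; exact fun h => hc1 h.symm
        have hc2' : ("authentication" = category) = False := by simp; exact fun h => hc2 h.symm
        have hc3' : ("error" = category) = False := by simp; exact fun h => hc3 h.symm
        refine pvCore _ _ 0 (by omega) (by omega) ?_ ?_ ?_
        · simp [pvCatRank, PySem.Dict.getD, PySem.Dict.get?, hc1', hc2', hc3']
        · simp [hc1]
        · simp [hc2, hc3]
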